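-- pv_equiv track=rewrite | github.com/TheKingDavidF/all_stuff | NumberSolitaire.py | division_by_sign
-- ===== SOURCE A (Python) =====
-- def division_by_sign(A):
--     n = len(A)
--     res_set = []
--     aux_set = []
--     count = 0
--     for ii in range(n):
--         if A[ii] > 0:
--             count += A[ii]
--             if aux_set:
--                 res_set.append(aux_set)
--                 aux_set = []
--         else:
--             aux_set.append(A[ii])
--     if aux_set:
--         res_set.append(aux_set)
--     return count, res_set
-- ===== SOURCE B (Python) =====
-- def division_by_sign(A):
--     # Backward pass building the answer back-to-front: non-positive runs are
--     # collected (reversed) as they are met walking right-to-left, positives are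
--     # summed and close the current run; one final reversal restores the order.
--     # No forward aux-buffer with flush-on-positive and trailing flush as in A.
--     count = 0
--     groups = []   # non-positive runs in right-to-left order, each run reversed
--     cur = None
--     for x in reversed(A):
--         if x > 0:
--             count += x
--             cur = None
--         elif cur is None:
--             cur = [x]
--             groups.append(cur)
--         else:
--             cur.append(x)
--     return count, [g[::-1] for g in reversed(groups)]
-- ===== Notes on version B (the rewrite author's own statement) =====
-- stated objective: alternative
-- what changed: Replaces A's forward state machine (aux_set buffer with flush-on-positive and a final flush) by a backward traversal that builds the answer back-to-front: non-positive runs are collected reversed while walking right-to-left and a single final reversal restores the order, with no buffer/flush step.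
import Mathlib
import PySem

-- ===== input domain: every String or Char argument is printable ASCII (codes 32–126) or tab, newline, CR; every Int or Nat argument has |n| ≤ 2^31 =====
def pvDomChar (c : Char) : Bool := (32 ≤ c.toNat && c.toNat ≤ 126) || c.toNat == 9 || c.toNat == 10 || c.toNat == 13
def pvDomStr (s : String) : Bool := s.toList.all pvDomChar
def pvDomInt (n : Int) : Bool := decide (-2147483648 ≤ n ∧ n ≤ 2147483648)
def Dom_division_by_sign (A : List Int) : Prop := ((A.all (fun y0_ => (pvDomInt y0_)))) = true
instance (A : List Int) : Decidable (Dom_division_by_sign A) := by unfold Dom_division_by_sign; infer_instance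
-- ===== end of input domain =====

-- B replaces A's forward buffer/flush state machine by a backward traversal building
-- the result back-to-front, growing the front group in place (objective: alternative).

-- ===== PORT A =====
-- index loop with state (res_set, aux_set, count); A[ii] via pyGetD (always in range here, exact)
def division_by_sign (A : List Int) : Int × List (List Int) :=
  let s : List (List Int) × List Int × Int :=
    (PySem.List.pyRange 0 (A.length : Int) 1).foldl
      (fun st ii =>
        let a := PySem.List.pyGetD A ii 0
        if a > 0 then
          if st.2.1 ≠ [] then (st.1 ++ [st.2.1], ([] : List Int), st.2.2 + a)
          else (st.1, st.2.1, st.2.2 + a)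
        else (st.1, st.2.1 ++ [a], st.2.2))
      ([], [], 0)
  if s.2.1 ≠ [] then (s.2.2, s.1 ++ [s.2.1]) else (s.2.2, s.1)

-- ===== PORT B =====
-- cur.append(x) mutates the last element of groups through the alias cur, so the
-- port updates the last group in place (exact; cur is None iff the flag is false)
def appendLast : List (List Int) → Int → List (List Int)
  | [], _ => []
  | [g], x => [g ++ [x]]
  | g :: t, x => g :: appendLast t x

-- loop body of Source B: state (count, groups, cur-is-not-None); iterated over reversed(A)
def stepR (st : Int × List (List Int) × Bool) (x : Int) : Int × List (List Int) × Bool :=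
  if x > 0 then (st.1 + x, st.2.1, false)
  else if st.2.2 then (st.1, appendLast st.2.1 x, true)
  else (st.1, st.2.1 ++ [[x]], true)

def division_by_sign_alt (A : List Int) : Int × List (List Int) :=
  let s := A.reverse.foldl stepR (0, [], false)
  (s.1, (s.2.1.reverse).map (fun g => g.reverse))

-- ===== PRECONDITION & SPEC =====
def Spec_division_by_sign (A : List Int) (out : Int × List (List Int)) : Prop := out = division_by_sign_alt A
instance (A : List Int) (out : Int × List (List Int)) : Decidable (Spec_division_by_sign A out) := by unfold Spec_division_by_sign; infer_instance

-- ===== CLAIM (what is proved, stated in full; the proofs are below) =====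
def Claim_equal_division_by_sign : Prop := ∀ (A : List Int), Dom_division_by_sign A → Spec_division_by_sign A (division_by_sign A)

-- ===== LEMMAS AND PROOFS =====

-- Common intermediate: the list split into maximal same-sign runs (key = x > 0)
def runsBy : List Int → List (Bool × List Int)
  | [] => []
  | a :: t =>
    match runsBy t with
    | (k, g) :: r =>
      if decide (a > 0) = k then (k, a :: g) :: r
      else (decide (a > 0), [a]) :: (k, g) :: r
    | [] => [(decide (a > 0), [a])]

-- A's loop body, named
def stepA (st : List (List Int) × List Int × Int) (a : Int) : List (List Int) × List Int × Int :=
  if a > 0 then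
    if st.2.1 ≠ [] then (st.1 ++ [st.2.1], ([] : List Int), st.2.2 + a)
    else (st.1, st.2.1, st.2.2 + a)
  else (st.1, st.2.1 ++ [a], st.2.2)

-- fold over runs (the reference semantics both ports are reduced to)
def stepB (st : Int × List (List Int)) (pg : Bool × List Int) : Int × List (List Int) :=
  if pg.1 then (st.1 + pg.2.sum, st.2) else (st.1, st.2 ++ [pg.2])

def finA (s : List (List Int) × List Int × Int) : Int × List (List Int) :=
  if s.2.1 ≠ [] then (s.2.2, s.1 ++ [s.2.1]) else (s.2.2, s.1)

-- projections of the run list, used for B's invariant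
def sumPos : List (Bool × List Int) → Int
  | [] => 0
  | (k, g) :: r => (if k then g.sum else 0) + sumPos r

def npGroups : List (Bool × List Int) → List (List Int)
  | [] => []
  | (k, g) :: r => (if k then [] else [g]) ++ npGroups r

def flagOf : List (Bool × List Int) → Bool
  | (false, _) :: _ => true
  | _ => false

lemma portA_eq (A : List Int) :
    division_by_sign A = finA (A.foldl stepA ([], [], 0)) := by
  unfold division_by_sign
  exact congrArg finA (PySem.List.foldl_pyRange_zero_pyGetD' A 0 stepA ([], [], 0))

lemma runsBy_cons (a : Int) (t : List Int) :
    runsBy (a :: t) =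
      (match runsBy t with
       | (k, g) :: r =>
         if decide (a > 0) = k then (k, a :: g) :: r
         else (decide (a > 0), [a]) :: (k, g) :: r
       | [] => [(decide (a > 0), [a])]) := rfl

lemma runsBy_all_nonpos (aux : List Int) (hne : aux ≠ [])
    (h : ∀ x ∈ aux, ¬ (0 < x)) : runsBy aux = [(false, aux)] := by
  induction aux with
  | nil => exact absurd rfl hne
  | cons x t ih =>
    have hx : ¬ (0 < x) := h x (by simp)
    cases t with
    | nil => simp [runsBy, hx]
    | cons y ys =>
      have ht := ih (by simp) (fun z hz => h z (by simp [hz]))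
      rw [runsBy_cons, ht]
      simp [hx]

lemma runsBy_pos_head (a : Int) (t : List Int) (ha : 0 < a) :
    ∃ g r, runsBy (a :: t) = (true, g) :: r := by
  cases h : runsBy t with
  | nil => exact ⟨[a], [], by rw [runsBy_cons, h]; simp [ha]⟩
  | cons p r =>
    obtain ⟨k, g⟩ := p
    by_cases hk : k = true
    · exact ⟨a :: g, r, by rw [runsBy_cons, h]; simp [ha, hk]⟩
    · exact ⟨[a], (k, g) :: r, by rw [runsBy_cons, h]; simp [ha, hk]⟩

lemma foldl_runs_pos (a : Int) (t : List Int) (ha : 0 < a) (c : Int) (res : List (List Int)) :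
    (runsBy (a :: t)).foldl stepB (c, res) = (runsBy t).foldl stepB (c + a, res) := by
  rw [runsBy_cons]
  cases h : runsBy t with
  | nil => simp [ha, stepB]
  | cons p r =>
    obtain ⟨k, g⟩ := p
    by_cases hk : k = true
    · subst hk
      simp only [ha, decide_true, if_pos, List.foldl_cons, stepB, List.sum_cons]
      rw [← add_assoc]
    · simp [stepB, ha, hk]

lemma runsBy_append_nonpos_pos (aux : List Int) (a : Int) (t : List Int)
    (hne : aux ≠ []) (hnp : ∀ x ∈ aux, ¬ (0 < x)) (ha : 0 < a) :
    runsBy (aux ++ a :: t) = (false, aux) :: runsBy (a :: t) := by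
  induction aux with
  | nil => exact absurd rfl hne
  | cons x ys ih =>
    have hx : ¬ (0 < x) := hnp x (by simp)
    cases ys with
    | nil =>
      obtain ⟨g, r, hgr⟩ := runsBy_pos_head a t ha
      rw [List.singleton_append, runsBy_cons, hgr]
      simp [hx]
    | cons y yt =>
      have hih := ih (by simp) (fun z hz => hnp z (by simp [hz]))
      rw [List.cons_append, runsBy_cons, hih]
      simp [hx]

-- A's fold equals the fold over runs
lemma main_lemma (A : List Int) : ∀ (aux : List Int) (res : List (List Int)) (c : Int),
    (∀ x ∈ aux, ¬ (0 < x)) →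
    finA (A.foldl stepA (res, aux, c)) = (runsBy (aux ++ A)).foldl stepB (c, res) := by
  induction A with
  | nil =>
    intro aux res c hnp
    by_cases hne : aux = []
    · subst hne; simp [finA, runsBy]
    · rw [List.append_nil, runsBy_all_nonpos aux hne hnp]
      simp [finA, hne, stepB]
  | cons a t ih =>
    intro aux res c hnp
    by_cases ha : 0 < a
    · by_cases hne : aux = []
      · subst hne
        have hstep : stepA (res, [], c) a = (res, [], c + a) := by simp [stepA, ha]
        rw [List.foldl_cons, hstep, List.nil_append, foldl_runs_pos a t ha,
          ih [] res (c + a) (by simp)]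
        simp
      · have hstep : stepA (res, aux, c) a = (res ++ [aux], [], c + a) := by
          simp [stepA, ha, hne]
        rw [List.foldl_cons, hstep, ih [] (res ++ [aux]) (c + a) (by simp),
          runsBy_append_nonpos_pos aux a t hne hnp ha]
        rw [List.foldl_cons, foldl_runs_pos a t ha]
        simp [stepB]
    · have hstep : stepA (res, aux, c) a = (res, aux ++ [a], c) := by simp [stepA, ha]
      have hnp' : ∀ x ∈ aux ++ [a], ¬ (0 < x) := by
        intro x hx
        rcases List.mem_append.1 hx with h | h
        · exact hnp x h
        · simp at h; subst h; exact ha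
      rw [List.foldl_cons, hstep, ih (aux ++ [a]) res c hnp']
      simp [List.append_assoc]

-- the fold over runs computes (sumPos, npGroups)
lemma foldB_eq (rs : List (Bool × List Int)) : ∀ (c : Int) (res : List (List Int)),
    rs.foldl stepB (c, res) = (c + sumPos rs, res ++ npGroups rs) := by
  induction rs with
  | nil => intro c res; simp [sumPos, npGroups]
  | cons p r ih =>
    intro c res
    obtain ⟨k, g⟩ := p
    cases k with
    | true => rw [List.foldl_cons]; simp [stepB, ih, sumPos, npGroups, add_assoc]
    | false => rw [List.foldl_cons]; simp [stepB, ih, sumPos, npGroups]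

-- B's backward fold: groups holds the non-positive runs in reverse order, each reversed
lemma appendLast_append (l : List (List Int)) (g : List Int) (x : Int) :
    appendLast (l ++ [g]) x = l ++ [g ++ [x]] := by
  induction l with
  | nil => rfl
  | cons a t ih =>
    cases t with
    | nil => simp [appendLast]
    | cons b u =>
      show a :: appendLast ((b :: u) ++ [g]) x = _
      rw [ih]
      simp

lemma hRuns (A : List Int) :
    A.foldr (fun x st => stepR st x) (0, [], false) =
      (sumPos (runsBy A), ((npGroups (runsBy A)).map List.reverse).reverse,
        flagOf (runsBy A)) := by
  induction A with
  | nil => simp [runsBy, sumPos, npGroups, flagOf]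
  | cons a t ih =>
    rw [List.foldr_cons, ih, runsBy_cons]
    by_cases ha : 0 < a
    · cases h : runsBy t with
      | nil => simp [stepR, ha, sumPos, npGroups, flagOf]
      | cons p r =>
        obtain ⟨k, g⟩ := p
        cases k with
        | true => simp [stepR, ha, sumPos, npGroups, flagOf]; ring
        | false => simp [stepR, ha, sumPos, npGroups, flagOf]; ring
    · cases h : runsBy t with
      | nil => simp [stepR, ha, sumPos, npGroups, flagOf]
      | cons p r =>
        obtain ⟨k, g⟩ := p
        cases k with
        | true => simp [stepR, ha, sumPos, npGroups, flagOf]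
        | false =>
          simp [stepR, ha, sumPos, npGroups, flagOf, appendLast_append]

lemma portB_eq (A : List Int) :
    division_by_sign_alt A = (sumPos (runsBy A), npGroups (runsBy A)) := by
  unfold division_by_sign_alt
  rw [List.foldl_reverse]
  have := hRuns A
  simp only [this]
  simp [List.map_map]

-- ===== VERDICT (by name: the statement is the Claim_ definition above) =====
theorem division_by_sign_spec : Claim_equal_division_by_sign := by
  intro A _
  show division_by_sign A = division_by_sign_alt A
  rw [portA_eq, portB_eq]
  have h := main_lemma A [] [] 0 (by simp)
  rw [List.nil_append] at h
  rw [h, foldB_eq]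
  simp
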